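-- pv_equiv track=rewrite | github.com/aykut-bozkurt/Indexer | query_matcher.py | find_doc_for_proximity
-- ===== SOURCE A (Python) =====
-- import itertools
--
-- def find_doc_for_proximity(candidateList, proximity_index_dict):
--
--     tuple_len = len(candidateList)
--     tuple_list = list(itertools.product(*candidateList))
--
--     for tuple in tuple_list:
--         flag = True
--         for i in range(0,tuple_len-1):
--             if tuple[i+1] <= tuple[i] or tuple[i+1] - tuple[i] > proximity_index_dict[i] + 1 :
--                 flag = False
--                 break
--         if flag:
--             return True
--
--     return False
-- ===== SOURCE B (Python) =====
-- def find_doc_for_proximity(candidateList, proximity_index_dict):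
--     # DP over positions: keep the set of values reachable at each position
--     # instead of enumerating the cartesian product of all candidate lists.
--     if not candidateList:
--         return True
--     if any(not lst for lst in candidateList):
--         return False
--     reach = set(candidateList[0])
--     for i in range(len(candidateList) - 1):
--         if not reach:
--             return False
--         reach = {v for v in set(candidateList[i + 1])
--                  if any(p < v and v - p <= proximity_index_dict[i] + 1
--                         for p in reach)}
--     return bool(reach)
-- ===== Notes on version B (the rewrite author's own statement) =====
-- stated objective: alternative
-- what changed: A enumerates the full cartesian product of all candidate lists and tests each tuple; B does a left-to-right DP keeping only the set of values reachable at each position, so the product is never built.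
-- outside the precondition, e.g. on find_doc_for_proximity([[4], [3, 5, -3], [2]], {0: 2, 2: 1}): A returns False, B returns False
import Mathlib
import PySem

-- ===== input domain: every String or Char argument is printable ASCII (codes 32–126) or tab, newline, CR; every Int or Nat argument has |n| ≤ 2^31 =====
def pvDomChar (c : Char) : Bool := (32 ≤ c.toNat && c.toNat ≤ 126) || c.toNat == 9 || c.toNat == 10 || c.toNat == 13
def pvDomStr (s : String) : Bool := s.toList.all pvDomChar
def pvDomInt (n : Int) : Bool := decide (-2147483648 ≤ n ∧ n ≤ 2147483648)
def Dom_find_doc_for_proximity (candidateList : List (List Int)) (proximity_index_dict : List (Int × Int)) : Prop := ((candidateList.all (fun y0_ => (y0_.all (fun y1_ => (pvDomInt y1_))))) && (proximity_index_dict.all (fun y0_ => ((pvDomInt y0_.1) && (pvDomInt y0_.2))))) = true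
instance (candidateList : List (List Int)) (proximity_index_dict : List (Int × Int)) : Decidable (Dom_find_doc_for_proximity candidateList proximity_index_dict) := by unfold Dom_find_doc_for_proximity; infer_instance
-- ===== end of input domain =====

-- B replaces A's enumeration of the whole cartesian product by a left-to-right DP over the
-- set of values reachable at each position; return value only, no observable side effects.

-- `proximity_index_dict[i] + 1`, the gap bound both Pythons read from the dict
-- (default 0 is never consulted under Pre_).
def pvGap (d : List (Int × Int)) (i : Nat) : Int :=
  (PySem.Dict.mk d).getD (Int.ofNat i) 0 + 1

-- ===== PORT A =====
-- itertools.product(*candidateList)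
def pvProduct : List (List Int) → List (List Int)
  | [] => [[]]
  | l :: ls => l.flatMap (fun x => (pvProduct ls).map (fun t => x :: t))

-- the inner `for i in range(0, tuple_len-1)` loop with its break / flag;
-- Python's t[i] for 0 ≤ i < len(t) is exactly t.getD i 0 (indices here are always in range)
def pvFlag (t : List Int) (d : List (Int × Int)) (stop i : Nat) : Bool :=
  if i < stop then
    if t.getD (i+1) 0 ≤ t.getD i 0 ∨ t.getD (i+1) 0 - t.getD i 0 > pvGap d i then false
    else pvFlag t d stop (i+1)
  else true
termination_by stop - i

-- the outer `for tuple in tuple_list` loop with its early `return True`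
def pvLoopA (d : List (Int × Int)) (n : Nat) : List (List Int) → Bool
  | [] => false
  | t :: ts => if pvFlag t d (n - 1) 0 then true else pvLoopA d n ts

def find_doc_for_proximity (candidateList : List (List Int)) (proximity_index_dict : List (Int × Int)) : Bool :=
  pvLoopA proximity_index_dict candidateList.length (pvProduct candidateList)

-- ===== PORT B =====
-- any(p < v and v - p <= proximity_index_dict[i] + 1 for p in reach)
def pvEdge (d : List (Int × Int)) (i : Nat) (reach : List Int) (v : Int) : Bool :=
  reach.any (fun p => decide (p < v) && decide (v - p ≤ pvGap d i))

-- {v for v in set(candidateList[i+1]) if any(...)}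
def pvStep (d : List (Int × Int)) (i : Nat) (reach : List Int) (next : List Int) : List Int :=
  (PySem.Set.ofList next).filter (fun v => pvEdge d i reach v)

-- the `for i in range(len(candidateList) - 1)` loop with its early `return False`
def pvLoopB (d : List (Int × Int)) : Nat → List Int → List (List Int) → Bool
  | _, reach, [] => !reach.isEmpty
  | i, reach, nl :: rest =>
    if reach.isEmpty then false
    else pvLoopB d (i+1) (pvStep d i reach nl) rest

def find_doc_for_proximity_alt (candidateList : List (List Int)) (proximity_index_dict : List (Int × Int)) : Bool :=
  match candidateList with
  | [] => true
  | l0 :: rest =>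
    if (l0 :: rest).any (fun l => l.isEmpty) then false
    else pvLoopB proximity_index_dict 0 (PySem.Set.ofList l0) rest

-- ===== PRECONDITION & SPEC =====
-- position j is a 'barrier': no tuple can pass the check there, so no position after j
-- is ever reached (and checking this itself needs no missing key)
def pvBarrier (candidateList : List (List Int)) (proximity_index_dict : List (Int × Int)) (j : Nat) : Bool :=
  ((candidateList.getD j []).all (fun p => (candidateList.getD (j+1) []).all (fun v => decide (v ≤ p)))) ||
  ((PySem.Dict.mk proximity_index_dict).contains (Int.ofNat j) &&
   (candidateList.getD j []).all (fun p => (candidateList.getD (j+1) []).all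
     (fun v => !(decide (p < v) && decide (v - p ≤ pvGap proximity_index_dict j)))))

-- Pre_ excludes inputs on which the gap dict may be consulted at a missing key (a KeyError in
-- both A and B). The exact set of keys consulted depends on reachability, which is not a
-- closed-form shape, so the condition is conservative (each position's key is present, or no
-- value pair there can pass the comparison that precedes the lookup, or an earlier barrier
-- position stops every tuple first); it still excludes a few inputs on which the missing key
-- happens never to be reached and A returns False (see cites).
def Pre_find_doc_for_proximity (candidateList : List (List Int)) (proximity_index_dict : List (Int × Int)) : Prop :=
  (∃ l ∈ candidateList, l = []) ∨
  ∀ i : Nat, i < candidateList.length - 1 →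
    ((PySem.Dict.mk proximity_index_dict).contains (Int.ofNat i) = true ∨
     (∀ p ∈ candidateList.getD i [], ∀ v ∈ candidateList.getD (i+1) [], v ≤ p) ∨
     ∃ j < i, pvBarrier candidateList proximity_index_dict j = true)

instance (candidateList : List (List Int)) (proximity_index_dict : List (Int × Int)) : Decidable (Pre_find_doc_for_proximity candidateList proximity_index_dict) := by unfold Pre_find_doc_for_proximity; infer_instance

def pvWitness_find_doc_for_proximity : List (List Int) × (List (Int × Int)) := ([[1, 4], [3]], [(0, 2)])

def Spec_find_doc_for_proximity (candidateList : List (List Int)) (proximity_index_dict : List (Int × Int)) (out : Bool) : Prop := out = find_doc_for_proximity_alt candidateList proximity_index_dict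
instance (candidateList : List (List Int)) (proximity_index_dict : List (Int × Int)) (out : Bool) : Decidable (Spec_find_doc_for_proximity candidateList proximity_index_dict out) := by unfold Spec_find_doc_for_proximity; infer_instance

-- ===== CLAIM (what is proved, stated in full; the proofs are below) =====
def Claim_equal_find_doc_for_proximity : Prop := ∀ (candidateList : List (List Int)) (proximity_index_dict : List (Int × Int)), Dom_find_doc_for_proximity candidateList proximity_index_dict → Pre_find_doc_for_proximity candidateList proximity_index_dict → Spec_find_doc_for_proximity candidateList proximity_index_dict (find_doc_for_proximity candidateList proximity_index_dict)

-- ===== LEMMAS AND PROOFS =====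

-- The common specification: a chain v_i ∈ candidateList[i] with
-- v_i < v_{i+1} ≤ v_i + gap(i) exists, starting below value p at key index i.
def pvGoodFrom (g : Nat → Int) : Nat → Int → List (List Int) → Prop
  | _, _, [] => True
  | i, p, l :: ls => ∃ v ∈ l, p < v ∧ v - p ≤ g i ∧ pvGoodFrom g (i+1) v ls

def pvChainEx (g : Nat → Int) (cl : List (List Int)) : Prop :=
  match cl with
  | [] => True
  | l :: ls => ∃ v ∈ l, pvGoodFrom g 0 v ls

-- the pairwise condition pvFlag checks, over the tuple v :: t with dict keys based at i
def pvHC (g : Nat → Int) (v : Int) (t : List Int) (i : Nat) : Prop :=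
  ∀ j : Nat, j < t.length →
    (v :: t).getD j 0 < (v :: t).getD (j+1) 0 ∧
    (v :: t).getD (j+1) 0 - (v :: t).getD j 0 ≤ g (i + j)

lemma pvLoopA_iff (d : List (Int × Int)) (n : Nat) (ts : List (List Int)) :
    pvLoopA d n ts = true ↔ ∃ t ∈ ts, pvFlag t d (n - 1) 0 = true := by
  induction ts with
  | nil => simp [pvLoopA]
  | cons t ts ih =>
    simp only [pvLoopA]
    by_cases h : pvFlag t d (n - 1) 0 = true
    · simp [h]
    · simp [h, ih]

lemma mem_pvProduct (ls : List (List Int)) (t : List Int) :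
    t ∈ pvProduct ls ↔ List.Forall₂ (· ∈ ·) t ls := by
  induction ls generalizing t with
  | nil => simp [pvProduct, List.forall₂_nil_right_iff]
  | cons l ls ih =>
    simp only [pvProduct, List.mem_flatMap, List.mem_map, List.forall₂_cons_right_iff]
    constructor
    · rintro ⟨x, hx, t', ht', rfl⟩
      exact ⟨x, t', hx, (ih t').mp ht', rfl⟩
    · rintro ⟨x, t', hx, ht', rfl⟩
      exact ⟨x, hx, t', (ih t').mpr ht', rfl⟩

lemma pvFlag_iff (t : List Int) (d : List (Int × Int)) (stop i : Nat) :
    pvFlag t d stop i = true ↔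
      ∀ j : Nat, i ≤ j → j < stop →
        t.getD j 0 < t.getD (j+1) 0 ∧ t.getD (j+1) 0 - t.getD j 0 ≤ pvGap d j := by
  fun_induction pvFlag t d stop i with
  | case1 i hlt hcond =>
    constructor
    · intro h; cases h
    · intro h
      exfalso
      rcases h i le_rfl hlt with ⟨h1, h2⟩
      rcases hcond with hc | hc <;> omega
  | case2 i hlt hcond ih =>
    rw [ih]
    push Not at hcond
    constructor
    · intro h j hij hj
      rcases Nat.eq_or_lt_of_le hij with rfl | hij'
      · exact ⟨by omega, by omega⟩
      · exact h j hij' hj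
    · intro h j hij hj
      exact h j (by omega) hj
  | case3 i hlt =>
    constructor
    · intro _ j hij hj; omega
    · intro _; rfl

lemma pvHC_iff (g : Nat → Int) (v w : Int) (t : List Int) (i : Nat) :
    pvHC g v (w :: t) i ↔ (v < w ∧ w - v ≤ g i) ∧ pvHC g w t (i + 1) := by
  constructor
  · intro h
    refine ⟨?_, ?_⟩
    · have := h 0 (by simp)
      simp only [List.getD_cons_zero, List.getD_cons_succ, Nat.add_zero] at this
      exact this
    · intro j hj
      have := h (j+1) (by simpa using Nat.succ_lt_succ hj)
      simp only [List.getD_cons_succ] at this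
      have harith : i + (j + 1) = i + 1 + j := by omega
      rw [harith] at this
      exact this
  · rintro ⟨⟨h1, h2⟩, hrest⟩ j hj
    cases j with
    | zero =>
      simp only [List.getD_cons_zero, List.getD_cons_succ, Nat.add_zero]
      exact ⟨h1, h2⟩
    | succ j =>
      have := hrest j (by simpa using Nat.lt_of_succ_lt_succ hj)
      simp only [List.getD_cons_succ]
      have harith : i + (j + 1) = i + 1 + j := by omega
      rw [harith]
      exact this

lemma pvHC_goodFrom (g : Nat → Int) (ls : List (List Int)) :
    ∀ (i : Nat) (v : Int),
      (∃ t, List.Forall₂ (· ∈ ·) t ls ∧ pvHC g v t i) ↔ pvGoodFrom g i v ls := by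
  induction ls with
  | nil =>
    intro i v
    simp only [List.forall₂_nil_right_iff, pvGoodFrom]
    constructor
    · intro _; trivial
    · intro _; exact ⟨[], rfl, by intro j hj; simp at hj⟩
  | cons l ls ih =>
    intro i v
    simp only [List.forall₂_cons_right_iff, pvGoodFrom]
    constructor
    · rintro ⟨t, ⟨w, t', hw, ht', rfl⟩, hhc⟩
      rw [pvHC_iff] at hhc
      exact ⟨w, hw, hhc.1.1, hhc.1.2, (ih (i+1) w).mp ⟨t', ht', hhc.2⟩⟩
    · rintro ⟨w, hw, h1, h2, hgood⟩
      rcases (ih (i+1) w).mpr hgood with ⟨t', ht', hhc⟩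
      exact ⟨w :: t', ⟨w, t', hw, ht', rfl⟩, (pvHC_iff g v w t' i).mpr ⟨⟨h1, h2⟩, hhc⟩⟩

lemma forall₂_length {t : List Int} {ls : List (List Int)} (h : List.Forall₂ (· ∈ ·) t ls) :
    t.length = ls.length := List.Forall₂.length_eq h

lemma A_char (cl : List (List Int)) (d : List (Int × Int)) :
    find_doc_for_proximity cl d = true ↔ pvChainEx (pvGap d) cl := by
  cases cl with
  | nil =>
    simp only [find_doc_for_proximity, pvProduct, pvChainEx, pvLoopA]
    rw [pvFlag]
    simp
  | cons l ls =>
    simp only [find_doc_for_proximity, pvChainEx]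
    rw [pvLoopA_iff]
    constructor
    · rintro ⟨t, ht, hflag⟩
      rw [mem_pvProduct] at ht
      rcases (List.forall₂_cons_right_iff).mp ht with ⟨v, t', hv, ht', rfl⟩
      refine ⟨v, hv, (pvHC_goodFrom (pvGap d) ls 0 v).mp ⟨t', ht', ?_⟩⟩
      rw [pvFlag_iff] at hflag
      intro j hj
      have hlen : t'.length = ls.length := forall₂_length ht'
      have := hflag j (Nat.zero_le j) (by simp; omega)
      simpa [Nat.zero_add] using this
    · rintro ⟨v, hv, hgood⟩
      rcases (pvHC_goodFrom (pvGap d) ls 0 v).mpr hgood with ⟨t', ht', hhc⟩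
      have hlen : t'.length = ls.length := forall₂_length ht'
      refine ⟨v :: t', (mem_pvProduct _ _).mpr ((List.forall₂_cons_right_iff).mpr ⟨v, t', hv, ht', rfl⟩), ?_⟩
      rw [pvFlag_iff]
      intro j _ hj
      have := hhc j (by simp at hj; omega)
      simpa [Nat.zero_add] using this

lemma pvLoopB_iff (d : List (Int × Int)) (rest : List (List Int)) :
    ∀ (i : Nat) (reach : List Int),
      pvLoopB d i reach rest = true ↔ ∃ p ∈ reach, pvGoodFrom (pvGap d) i p rest := by
  induction rest with
  | nil =>
    intro i reach
    cases reach <;> simp [pvLoopB, pvGoodFrom]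
  | cons nl rest ih =>
    intro i reach
    simp only [pvLoopB]
    by_cases hre : reach.isEmpty
    · rw [if_pos hre]
      rw [List.isEmpty_iff] at hre
      subst hre
      simp [pvGoodFrom]
    · rw [if_neg hre, ih]
      simp only [pvGoodFrom, pvStep, List.mem_filter, PySem.Set.mem_ofList, pvEdge,
        List.any_eq_true, decide_eq_true_eq, Bool.and_eq_true]
      constructor
      · rintro ⟨v, ⟨hvnl, p, hp, h1, h2⟩, hgood⟩
        exact ⟨p, hp, v, hvnl, h1, h2, hgood⟩
      · rintro ⟨p, hp, v, hvnl, h1, h2, hgood⟩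
        exact ⟨v, ⟨hvnl, p, hp, h1, h2⟩, hgood⟩

lemma pvGoodFrom_no_empty (g : Nat → Int) (ls : List (List Int)) :
    ∀ (i : Nat) (v : Int), pvGoodFrom g i v ls → ∀ l ∈ ls, l ≠ [] := by
  induction ls with
  | nil => intro i v _ l hl; simp at hl
  | cons l' ls ih =>
    rintro i v ⟨w, hw, _, _, hgood⟩ l hl
    rcases List.mem_cons.mp hl with rfl | hl'
    · exact List.ne_nil_of_mem hw
    · exact ih (i+1) w hgood l hl'

lemma B_char (cl : List (List Int)) (d : List (Int × Int)) :
    find_doc_for_proximity_alt cl d = true ↔ pvChainEx (pvGap d) cl := by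
  cases cl with
  | nil => simp [find_doc_for_proximity_alt, pvChainEx]
  | cons l ls =>
    simp only [find_doc_for_proximity_alt, pvChainEx]
    by_cases hemp : (l :: ls).any (fun l => l.isEmpty)
    · rw [if_pos hemp]
      simp only [List.any_eq_true, List.isEmpty_iff] at hemp
      rcases hemp with ⟨l0, hl0, hl0e⟩
      constructor
      · intro h; cases h
      · rintro ⟨v, hv, hgood⟩
        exfalso
        rcases List.mem_cons.mp hl0 with rfl | hl0'
        · rw [hl0e] at hv; simp at hv
        · exact pvGoodFrom_no_empty (pvGap d) ls 0 v hgood l0 hl0' hl0e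
    · rw [if_neg hemp, pvLoopB_iff]
      simp [PySem.Set.mem_ofList]

-- ===== VERDICT (by name: the statement is the Claim_ definition above) =====
theorem find_doc_for_proximity_spec : Claim_equal_find_doc_for_proximity := by
  intro cl d _ _
  unfold Spec_find_doc_for_proximity
  rw [Bool.eq_iff_iff, A_char, B_char]
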